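-- pv_equiv track=rewrite | github.com/Pylyr/thesis-concurrency | linearize_io_helper.py | ordAfter
-- ===== SOURCE A (Python) =====
-- from typing import Dict, DefaultDict, Optional, List, Set, Any, Tuple
--
-- def ordAfter(blocks: List[List[int]], var1: int, var2: int):
--     """
--     returns true if latest block index of var1 is before earliest block index of var2
--     """
--     block1 = None
--     block2 = None
--     for i in range(len(blocks)):
--         if var1 in blocks[len(blocks) - i - 1]:
--             block1 = len(blocks) - i - 1
--             break
--     for i in range(len(blocks)):
--         if var2 in blocks[i]:
--             block2 = i
--             break
--     if block1 is None or block2 is None: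
--         raise Exception("variable not found in blocks")
--
--     return block2 > block1
-- ===== SOURCE B (Python) =====
-- def ordAfter(blocks, var1, var2):
--     """
--     returns true if latest block index of var1 is before earliest block index of var2
--     """
--     # Single forward pass, no indices: the latest var1-block precedes the earliest
--     # var2-block iff no block containing var1 appears at or after a block containing var2.
--     seen1 = False
--     seen2 = False
--     ok = True
--     for b in blocks:
--         if var2 in b:
--             seen2 = True
--         if var1 in b:
--             seen1 = True
--             if seen2:
--                 ok = False
--     if not (seen1 and seen2):
--         raise Exception("variable not found in blocks")
--     return ok
-- ===== Notes on version B (the rewrite author's own statement) =====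
-- stated objective: alternative
-- what changed: Replaces the two index-computing scans (backward for var1's latest block, forward for var2's earliest) and the index comparison by a single forward pass over the blocks maintaining three boolean flags and no indices at all: the answer is false exactly when a var1-block is met at or after a var2-block.
import Mathlib
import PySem

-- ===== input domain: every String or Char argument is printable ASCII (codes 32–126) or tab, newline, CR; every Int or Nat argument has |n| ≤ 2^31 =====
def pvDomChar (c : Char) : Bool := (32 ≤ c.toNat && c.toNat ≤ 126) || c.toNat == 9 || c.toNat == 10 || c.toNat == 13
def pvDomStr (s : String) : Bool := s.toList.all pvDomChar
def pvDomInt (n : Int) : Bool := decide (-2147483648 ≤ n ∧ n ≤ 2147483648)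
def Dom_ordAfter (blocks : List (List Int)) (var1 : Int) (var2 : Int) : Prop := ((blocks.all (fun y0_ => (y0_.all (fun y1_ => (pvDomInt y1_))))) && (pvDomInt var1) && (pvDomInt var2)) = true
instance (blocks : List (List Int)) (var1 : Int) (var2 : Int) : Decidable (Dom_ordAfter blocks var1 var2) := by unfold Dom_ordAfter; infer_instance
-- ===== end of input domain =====

-- B replaces A's two index-computing directional scans and the index comparison by a single
-- forward pass with three boolean flags and no indices (alternative decomposition, same cost);
-- equivalence of the RETURN value is proved on inputs where A does not raise.

-- ===== PORT A =====
-- first loop: for i in range(len(blocks)): if var1 in blocks[len-i-1]: block1 = len-i-1; break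
def ordAfterLoop1 (blocks : List (List Int)) (v : Int) : List Int → Option Int
  | [] => none
  | i :: rest =>
      let idx := (blocks.length : Int) - i - 1
      if v ∈ PySem.List.pyGetD blocks idx [] then some idx else ordAfterLoop1 blocks v rest

-- second loop: for i in range(len(blocks)): if var2 in blocks[i]: block2 = i; break
def ordAfterLoop2 (blocks : List (List Int)) (v : Int) : List Int → Option Int
  | [] => none
  | i :: rest =>
      if v ∈ PySem.List.pyGetD blocks i [] then some i else ordAfterLoop2 blocks v rest

def ordAfter (blocks : List (List Int)) (var1 : Int) (var2 : Int) : Bool :=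
  let block1 := ordAfterLoop1 blocks var1 (PySem.List.pyRange 0 blocks.length 1)
  let block2 := ordAfterLoop2 blocks var2 (PySem.List.pyRange 0 blocks.length 1)
  match block1, block2 with
  | some b1, some b2 => decide (b2 > b1)
  | _, _ => false    -- Python raises Exception here; excluded by Pre_ordAfter

-- ===== PORT B =====
-- loop state (seen1, seen2, ok), exactly the Python loop body
def ordAfterStep (var1 var2 : Int) (st : Bool × Bool × Bool) (b : List Int) : Bool × Bool × Bool :=
  let s2 := st.2.1 || decide (var2 ∈ b)
  if var1 ∈ b then (true, s2, if s2 then false else st.2.2)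
  else (st.1, s2, st.2.2)

def ordAfter_alt (blocks : List (List Int)) (var1 : Int) (var2 : Int) : Bool :=
  let st := blocks.foldl (ordAfterStep var1 var2) (false, false, true)
  if st.1 && st.2.1 then st.2.2 else false    -- Python raises Exception here; excluded by Pre_ordAfter

-- ===== PRECONDITION & SPEC =====
-- Pre_ excludes exactly the inputs on which A (and B) raise Exception("variable not found in blocks"):
-- var1 or var2 occurs in no block.
def Pre_ordAfter (blocks : List (List Int)) (var1 : Int) (var2 : Int) : Prop :=
  (∃ b ∈ blocks, var1 ∈ b) ∧ (∃ b ∈ blocks, var2 ∈ b)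
instance (blocks : List (List Int)) (var1 : Int) (var2 : Int) : Decidable (Pre_ordAfter blocks var1 var2) := by unfold Pre_ordAfter; infer_instance

def pvWitness_ordAfter : List (List Int) × Int × Int := ([[1], [2, 1], [3]], 1, 3)

def Spec_ordAfter (blocks : List (List Int)) (var1 : Int) (var2 : Int) (out : Bool) : Prop := out = ordAfter_alt blocks var1 var2
instance (blocks : List (List Int)) (var1 : Int) (var2 : Int) (out : Bool) : Decidable (Spec_ordAfter blocks var1 var2 out) := by unfold Spec_ordAfter; infer_instance

-- ===== CLAIM (what is proved, stated in full; the proofs are below) =====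
def Claim_equal_ordAfter : Prop := ∀ (blocks : List (List Int)) (var1 : Int) (var2 : Int), Dom_ordAfter blocks var1 var2 → Pre_ordAfter blocks var1 var2 → Spec_ordAfter blocks var1 var2 (ordAfter blocks var1 var2)

-- ===== LEMMAS AND PROOFS =====

-- the occurrence-index "hit" function, for characterising A's loops
def pvHit (blocks : List (List Int)) (v : Int) (j : Int) : Option Int :=
  if v ∈ PySem.List.pyGetD blocks j [] then some j else none

theorem pvFindSome_eq_head_filterMap {α β : Type} (f : α → Option β) (l : List α) :
    l.findSome? f = (l.filterMap f).head? := by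
  induction l with
  | nil => rfl
  | cons a t ih =>
      rw [List.findSome?_cons, List.filterMap_cons]
      cases h : f a with
      | none => exact ih
      | some b => rfl

theorem pvLoop2_eq_findSome (blocks : List (List Int)) (v : Int) (l : List Int) :
    ordAfterLoop2 blocks v l = l.findSome? (pvHit blocks v) := by
  induction l with
  | nil => rfl
  | cons i rest ih =>
      simp only [ordAfterLoop2, List.findSome?_cons, pvHit]
      by_cases h : v ∈ PySem.List.pyGetD blocks i [] <;> simp [h, ih]

theorem pvLoop1_eq_findSome (blocks : List (List Int)) (v : Int) (l : List Int) :
    ordAfterLoop1 blocks v l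
      = (l.map (fun i => (blocks.length : Int) - i - 1)).findSome? (pvHit blocks v) := by
  induction l with
  | nil => rfl
  | cons i rest ih =>
      simp only [ordAfterLoop1, List.map_cons, List.findSome?_cons, pvHit]
      by_cases h : v ∈ PySem.List.pyGetD blocks ((blocks.length : Int) - i - 1) [] <;> simp [h, ih]

-- the reversed index map: [len-i-1 for i in range(len)] is range(len) reversed
theorem pvRevMap (n : Nat) :
    (PySem.List.pyRange 0 n 1).map (fun i => (n : Int) - i - 1)
      = (PySem.List.pyRange 0 n 1).reverse := by
  have e1 : (PySem.List.pyRange 0 n 1).map (fun i => (n : Int) - i - 1)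
      = PySem.List.pyRange ((n : Int) - 1) (-1) (-1) := by
    rw [PySem.List.pyRange_one, PySem.List.pyRange_neg_one, List.map_map]
    have h1 : ((n : Int) - 0).toNat = n := by omega
    have h2 : ((n : Int) - 1 - (-1)).toNat = n := by omega
    rw [h1, h2]
    apply List.map_congr_left
    intro k _
    simp
    omega
  rw [e1, PySem.List.pyRange_neg_one_eq_reverse]
  have h3 : ((n : Int) - 1 + 1) = (n : Int) := by ring
  rw [h3]
  norm_num

theorem pvLoop1_getLast (blocks : List (List Int)) (v : Int) :
    ordAfterLoop1 blocks v (PySem.List.pyRange 0 blocks.length 1)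
      = ((PySem.List.pyRange 0 blocks.length 1).filterMap (pvHit blocks v)).getLast? := by
  rw [pvLoop1_eq_findSome, pvRevMap, pvFindSome_eq_head_filterMap,
      List.filterMap_reverse, List.head?_reverse]

theorem pvLoop2_head (blocks : List (List Int)) (v : Int) :
    ordAfterLoop2 blocks v (PySem.List.pyRange 0 blocks.length 1)
      = ((PySem.List.pyRange 0 blocks.length 1).filterMap (pvHit blocks v)).head? := by
  rw [pvLoop2_eq_findSome, pvFindSome_eq_head_filterMap]

-- the index list is ≤-sorted
theorem pvIdx_pairwise (blocks : List (List Int)) (v : Int) :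
    ((PySem.List.pyRange 0 blocks.length 1).filterMap (pvHit blocks v)).Pairwise (· ≤ ·) := by
  rw [List.pairwise_filterMap]
  have hp := PySem.List.pairwise_lt_pyRange_one (0 : Int) (blocks.length : Int)
  refine hp.imp ?_
  intro a b hab x hx y hy
  unfold pvHit at hx hy
  split at hx <;> split at hy <;> simp_all
  omega

-- membership in the index list
theorem pvIdx_mem (blocks : List (List Int)) (v : Int) (x : Int) :
    x ∈ ((PySem.List.pyRange 0 blocks.length 1).filterMap (pvHit blocks v))
      ↔ ∃ k : Nat, k < blocks.length ∧ x = (k : Int) ∧ ∃ h : k < blocks.length, v ∈ blocks[k] := by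
  rw [List.mem_filterMap]
  constructor
  · rintro ⟨j, hj, hhit⟩
    rw [PySem.List.mem_pyRange_one] at hj
    unfold pvHit at hhit
    split at hhit
    · rename_i hmem
      cases hhit
      refine ⟨x.toNat, by omega, by omega, by omega, ?_⟩
      have hx : x = ((x.toNat : Nat) : Int) := by omega
      rw [hx, PySem.List.pyGetD_natCast] at hmem
      rwa [List.getD_eq_getElem?_getD, List.getElem?_eq_getElem (by omega)] at hmem
    · cases hhit
  · rintro ⟨k, hk, rfl, hk2, hmem⟩
    refine ⟨(k : Int), ?_, ?_⟩
    · rw [PySem.List.mem_pyRange_one]; omega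
    · unfold pvHit
      rw [PySem.List.pyGetD_natCast, List.getD_eq_getElem?_getD, List.getElem?_eq_getElem hk]
      simp [hmem]

theorem pvIdx_ne_nil (blocks : List (List Int)) (v : Int)
    (h : ∃ b ∈ blocks, v ∈ b) :
    ((PySem.List.pyRange 0 blocks.length 1).filterMap (pvHit blocks v)) ≠ [] := by
  obtain ⟨b, hb, hvb⟩ := h
  obtain ⟨k, hk, rfl⟩ := List.getElem_of_mem hb
  intro hnil
  have : ((k : Int)) ∈ ((PySem.List.pyRange 0 blocks.length 1).filterMap (pvHit blocks v)) := by
    rw [pvIdx_mem]; exact ⟨k, hk, rfl, hk, hvb⟩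
  simp [hnil] at this

-- bounds in a ≤-sorted list
theorem pvHead_le (l : List Int) (h : l.Pairwise (· ≤ ·)) (hne : l ≠ [])
    (x : Int) (hx : x ∈ l) : l.head hne ≤ x := by
  cases l with
  | nil => simp at hne
  | cons a t =>
      rw [List.pairwise_cons] at h
      rcases List.mem_cons.mp hx with rfl | hxt
      · exact le_refl _
      · exact h.1 x hxt

theorem pvLe_getLast (l : List Int) (h : l.Pairwise (· ≤ ·)) (hne : l ≠ [])
    (x : Int) (hx : x ∈ l) : x ≤ l.getLast hne := by
  induction l with
  | nil => simp at hne
  | cons a t ih =>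
      rw [List.pairwise_cons] at h
      cases t with
      | nil => simp_all
      | cons b t' =>
          rw [List.getLast_cons (by simp)]
          rcases List.mem_cons.mp hx with rfl | hxt
          · exact le_trans (h.1 _ (List.getLast_mem _)) (le_refl _)
          · exact ih h.2 (by simp) hxt

-- the pairwise ordering property both sides compute
def pvP (blocks : List (List Int)) (var1 var2 : Int) : Prop :=
  ∀ i j : Nat, ∀ hi : i < blocks.length, ∀ hj : j < blocks.length,
    var1 ∈ blocks[i] → var2 ∈ blocks[j] → i < j

-- ---- B side ----
-- the ok-component of the tail of the fold, as its own recursion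
def pvGo (var1 var2 : Int) : Bool → List (List Int) → Bool
  | _, [] => true
  | s2, b :: t =>
      let s2' := s2 || decide (var2 ∈ b)
      (!(decide (var1 ∈ b) && s2')) && pvGo var1 var2 s2' t

theorem pvFold_fst (var1 var2 : Int) (l : List (List Int)) (st : Bool × Bool × Bool) :
    (l.foldl (ordAfterStep var1 var2) st).1 = (st.1 || l.any (fun b => decide (var1 ∈ b))) := by
  induction l generalizing st with
  | nil => simp
  | cons b t ih =>
      simp only [List.foldl_cons, List.any_cons, ordAfterStep]
      by_cases h : var1 ∈ b <;> simp [h, ih]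

theorem pvFold_snd (var1 var2 : Int) (l : List (List Int)) (st : Bool × Bool × Bool) :
    (l.foldl (ordAfterStep var1 var2) st).2.1 = (st.2.1 || l.any (fun b => decide (var2 ∈ b))) := by
  induction l generalizing st with
  | nil => simp
  | cons b t ih =>
      simp only [List.foldl_cons, List.any_cons, ordAfterStep]
      by_cases h : var1 ∈ b <;> simp [h, ih, Bool.or_assoc]

theorem pvFold_ok (var1 var2 : Int) (l : List (List Int)) (s1 s2 ok : Bool) :
    (l.foldl (ordAfterStep var1 var2) (s1, s2, ok)).2.2 = (ok && pvGo var1 var2 s2 l) := by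
  induction l generalizing s1 s2 ok with
  | nil => simp [pvGo]
  | cons b t ih =>
      simp only [List.foldl_cons, ordAfterStep, pvGo]
      by_cases h : var1 ∈ b
      · simp only [h, if_true]
        rw [ih]
        by_cases h2 : (s2 || decide (var2 ∈ b)) = true <;> simp [h2]
      · simp only [h, if_false]
        rw [ih]
        simp

-- pvGo's meaning: no var1-block at/after a var2-block (or, with s2 set, anywhere)
theorem pvGo_iff (var1 var2 : Int) (s2 : Bool) (l : List (List Int)) :
    pvGo var1 var2 s2 l = true
      ↔ ∀ i : Nat, ∀ hi : i < l.length, var1 ∈ l[i] →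
          (s2 = false ∧ ∀ j : Nat, ∀ hj : j < l.length, j ≤ i → var2 ∉ l[j]) := by
  induction l generalizing s2 with
  | nil => simp [pvGo]
  | cons b t ih =>
      simp only [pvGo, Bool.and_eq_true, Bool.not_eq_true', Bool.and_eq_false_iff,
        decide_eq_false_iff_not, Bool.or_eq_false_iff, ih]
      constructor
      · rintro ⟨h1, h2⟩ i hi hmem
        cases i with
        | zero =>
            simp only [List.getElem_cons_zero] at hmem
            rcases h1 with hnot | ⟨hs2, hnb⟩
            · exact absurd hmem hnot
            · refine ⟨hs2, ?_⟩
              intro j hj hj0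
              interval_cases j
              simpa using hnb
        | succ k =>
            simp only [List.getElem_cons_succ] at hmem
            have hk : k < t.length := by simpa using hi
            obtain ⟨hs2', hjs⟩ := h2 k hk hmem
            obtain ⟨hs2, hnb⟩ := hs2'
            refine ⟨hs2, ?_⟩
            intro j hj hji
            cases j with
            | zero => simpa using hnb
            | succ j' =>
                simp only [List.getElem_cons_succ]
                exact hjs j' (by simpa using hj) (by omega)
      · intro h
        constructor
        · by_cases hb : var1 ∈ b
          · obtain ⟨hs2, hnb⟩ := h 0 (by simp) (by simpa using hb)
            exact Or.inr ⟨hs2, by simpa using hnb 0 (by simp) (le_refl 0)⟩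
          · exact Or.inl hb
        · intro k hk hmem
          obtain ⟨hs2, hjs⟩ := h (k + 1) (by simpa using Nat.succ_lt_succ hk)
            (by simpa using hmem)
          constructor
          · exact ⟨hs2, by simpa using hjs 0 (by simp) (by omega)⟩
          · intro j hj hji
            simpa using hjs (j + 1) (by simpa using Nat.succ_lt_succ hj) (by omega)

theorem pvGo_iff_P (var1 var2 : Int) (blocks : List (List Int)) :
    pvGo var1 var2 false blocks = true ↔ pvP blocks var1 var2 := by
  rw [pvGo_iff]
  unfold pvP
  constructor
  · intro h i j hi hj h1 h2
    obtain ⟨-, hjs⟩ := h i hi h1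
    by_contra hc
    exact hjs j hj (by omega) h2
  · intro h i hi h1
    refine ⟨rfl, ?_⟩
    intro j hj hji h2
    have := h i j hi hj h1 h2
    omega

-- ---- A side: min/max against pvP ----
theorem pvA_iff_P (blocks : List (List Int)) (var1 var2 : Int)
    (hne1 : ((PySem.List.pyRange 0 blocks.length 1).filterMap (pvHit blocks var1)) ≠ [])
    (hne2 : ((PySem.List.pyRange 0 blocks.length 1).filterMap (pvHit blocks var2)) ≠ []) :
    (((PySem.List.pyRange 0 blocks.length 1).filterMap (pvHit blocks var1)).getLast hne1
      < ((PySem.List.pyRange 0 blocks.length 1).filterMap (pvHit blocks var2)).head hne2)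
      ↔ pvP blocks var1 var2 := by
  constructor
  · intro hlt i j hi hj hm1 hm2
    have hi' : ((i : Int)) ∈ ((PySem.List.pyRange 0 blocks.length 1).filterMap (pvHit blocks var1)) := by
      rw [pvIdx_mem]; exact ⟨i, hi, rfl, hi, hm1⟩
    have hj' : ((j : Int)) ∈ ((PySem.List.pyRange 0 blocks.length 1).filterMap (pvHit blocks var2)) := by
      rw [pvIdx_mem]; exact ⟨j, hj, rfl, hj, hm2⟩
    have h1 := pvLe_getLast _ (pvIdx_pairwise blocks var1) hne1 _ hi'
    have h2 := pvHead_le _ (pvIdx_pairwise blocks var2) hne2 _ hj'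
    omega
  · intro hP
    have hm1 := List.getLast_mem hne1
    have hm2 := List.head_mem hne2
    rw [pvIdx_mem] at hm1 hm2
    obtain ⟨k1, hk1, he1, hk1', hv1⟩ := hm1
    obtain ⟨k2, hk2, he2, hk2', hv2⟩ := hm2
    have := hP k1 k2 hk1 hk2 hv1 hv2
    omega

-- ===== VERDICT (by name: the statement is the Claim_ definition above) =====
theorem ordAfter_spec : Claim_equal_ordAfter := by
  intro blocks var1 var2 _ hpre
  obtain ⟨h1, h2⟩ := hpre
  unfold Spec_ordAfter ordAfter ordAfter_alt
  have hne1 := pvIdx_ne_nil blocks var1 h1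
  have hne2 := pvIdx_ne_nil blocks var2 h2
  -- A side reduces to a comparison of getLast and head
  simp only [pvLoop1_getLast, pvLoop2_head,
      List.getLast?_eq_some_getLast hne1, List.head?_eq_some_head hne2]
  -- B side: both seen-flags are true, the ok component is pvGo
  have hs1 : blocks.any (fun b => decide (var1 ∈ b)) = true := by
    rw [List.any_eq_true]
    obtain ⟨b, hb, hv⟩ := h1
    exact ⟨b, hb, by simpa using hv⟩
  have hs2 : blocks.any (fun b => decide (var2 ∈ b)) = true := by
    rw [List.any_eq_true]
    obtain ⟨b, hb, hv⟩ := h2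
    exact ⟨b, hb, by simpa using hv⟩
  simp only [pvFold_fst, pvFold_snd, pvFold_ok, hs1, hs2, Bool.false_or, Bool.true_and,
    Bool.and_self, if_true]
  have hiff : (((PySem.List.pyRange 0 blocks.length 1).filterMap (pvHit blocks var2)).head hne2
      > ((PySem.List.pyRange 0 blocks.length 1).filterMap (pvHit blocks var1)).getLast hne1)
      ↔ (pvGo var1 var2 false blocks = true) :=
    (pvA_iff_P blocks var1 var2 hne1 hne2).trans (pvGo_iff_P var1 var2 blocks).symm
  cases hg : pvGo var1 var2 false blocks with
  | false => exact decide_eq_false (fun hl => by simp [hiff.mp hl] at hg)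
  | true => exact decide_eq_true (hiff.mpr hg)
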